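-- pv_equiv track=rewrite | github.com/cegielskir/Quine-McCluskey-Algorithm | quineMcCluskey.py | create2dArray
-- ===== SOURCE A (Python) =====
-- def create2dArray(reduced, trueValues):
--     matrix = [['0000' for x in range(len(trueValues) + 1)] for y in range(len(reduced) + 1)]
--     j = 0
--     matrix
--     for row in matrix:
--         if j > 0:
--             row[0] = reduced[j-1]
--         j = j + 1
--     trueValues = ['0000'] + trueValues
--     matrix[0] = trueValues
--     return matrix
-- ===== SOURCE B (Python) =====
-- def create2dArray(reduced, trueValues):
--     # column-major construction: first column is the labels, then one column per trueValue
--     columns = [['0000'] + reduced]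
--     for v in trueValues:
--         columns.append([v] + ['0000'] * len(reduced))
--     return [list(row) for row in zip(*columns)]
-- ===== Notes on version B (the rewrite author's own statement) =====
-- stated objective: alternative
-- what changed: B builds the matrix column-by-column (a label column '0000'+reduced, then one column per trueValue) and transposes with zip(*), instead of A's pre-filled row-major '0000' matrix patched in place.
import Mathlib
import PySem

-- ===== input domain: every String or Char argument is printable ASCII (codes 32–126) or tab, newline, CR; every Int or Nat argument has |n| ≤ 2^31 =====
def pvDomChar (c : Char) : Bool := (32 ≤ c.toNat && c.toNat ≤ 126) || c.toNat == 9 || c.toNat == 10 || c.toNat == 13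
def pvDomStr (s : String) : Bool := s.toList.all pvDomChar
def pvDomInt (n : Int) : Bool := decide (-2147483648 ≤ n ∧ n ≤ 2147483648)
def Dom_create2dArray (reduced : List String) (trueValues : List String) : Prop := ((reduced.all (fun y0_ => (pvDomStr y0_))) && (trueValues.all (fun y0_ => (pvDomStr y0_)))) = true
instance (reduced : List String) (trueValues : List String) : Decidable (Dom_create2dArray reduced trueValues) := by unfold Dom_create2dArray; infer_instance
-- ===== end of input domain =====

-- B builds the matrix column-by-column and transposes it with zip(*), instead of
-- A's pre-filled '0000' row matrix that is patched in place; same return value.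


-- ===== PORT A =====
-- A: build a (len reduced + 1) × (len trueValues + 1) matrix of '0000',
-- loop over rows with counter j setting row[0] = reduced[j-1] for j > 0,
-- then replace matrix[0] with ['0000'] + trueValues.
def create2dArray (reduced : List String) (trueValues : List String) : List (List String) :=
  let matrix : List (List String) :=
    (List.range (reduced.length + 1)).map
      (fun _ => (List.range (trueValues.length + 1)).map (fun _ => "0000"))
  -- the for-loop mutating row[0]; j-1 is always in range for j > 0, so getD is exact
  let matrix :=
    (matrix.foldl
      (fun (st : List (List String) × Nat) row =>
        (st.1 ++ [if st.2 > 0 then row.set 0 (reduced.getD (st.2 - 1) "") else row],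
         st.2 + 1))
      ([], 0)).1
  -- matrix[0] = ['0000'] + trueValues; matrix is always nonempty, so set is exact
  matrix.set 0 ("0000" :: trueValues)

-- ===== PORT B =====
-- Python's zip(*columns): emit the heads of all columns, recurse on the tails,
-- stop as soon as some column is exhausted (or there are no columns).  Fuel =
-- length of the first column bounds the number of steps exactly, since the
-- output of zip has min-length many rows; exact port of zip's truncation rule.
def pvZipGo : Nat → List (List String) → List (List String)
  | 0, _ => []
  | fuel + 1, cols =>
      if cols.isEmpty || cols.any (·.isEmpty) then []
      else (cols.map (·.headD "")) :: pvZipGo fuel (cols.map (·.tail))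

def pvZipStar (cols : List (List String)) : List (List String) :=
  pvZipGo (cols.headD []).length cols

def create2dArray_alt (reduced : List String) (trueValues : List String) : List (List String) :=
  let columns :=
    ("0000" :: reduced) ::
      trueValues.map (fun v => v :: (List.replicate reduced.length "0000"))
  pvZipStar columns

-- ===== PRECONDITION & SPEC =====
def Spec_create2dArray (reduced : List String) (trueValues : List String) (out : List (List String)) : Prop := out = create2dArray_alt reduced trueValues
instance (reduced : List String) (trueValues : List String) (out : List (List String)) : Decidable (Spec_create2dArray reduced trueValues out) := by unfold Spec_create2dArray; infer_instance

-- ===== CLAIM (what is proved, stated in full; the proofs are below) =====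
def Claim_equal_create2dArray : Prop := ∀ (reduced : List String) (trueValues : List String), Dom_create2dArray reduced trueValues → Spec_create2dArray reduced trueValues (create2dArray reduced trueValues)

-- ===== LEMMAS AND PROOFS =====

-- functional description of A's patching loop
def pvPatch (red : List String) : List (List String) → Nat → List (List String)
  | [], _ => []
  | r :: rs, j => (if j > 0 then r.set 0 (red.getD (j - 1) "") else r) :: pvPatch red rs (j + 1)

theorem pvFoldl_patch (red : List String) (m : List (List String)) :
    ∀ (acc : List (List String)) (j : Nat),
    (m.foldl
      (fun (st : List (List String) × Nat) row =>
        (st.1 ++ [if st.2 > 0 then row.set 0 (red.getD (st.2 - 1) "") else row],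
         st.2 + 1))
      (acc, j)).1 = acc ++ pvPatch red m j := by
  induction m with
  | nil => intro acc j; simp [pvPatch]
  | cons r rs ih =>
      intro acc j
      simp only [List.foldl_cons, pvPatch]
      rw [ih]
      simp

theorem pvPatch_replicate (red : List String) (row : List String) :
    ∀ (s : List String) (k : Nat), red.drop k = s →
    pvPatch red (List.replicate s.length row) (k + 1) =
      s.map (fun r => row.set 0 r) := by
  intro s
  induction s with
  | nil => intro k _; simp [pvPatch]
  | cons a s' ih =>
      intro k hk
      have h0 : red[k]? = some a := by
        have h := (List.getElem?_drop (xs := red) (i := k) (j := 0)).symm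
        rw [hk] at h
        simpa using h
      have hdrop : red.drop (k + 1) = s' := by
        have : (red.drop k).drop 1 = s' := by rw [hk]; simp
        simpa [List.drop_drop, Nat.add_comm] using this
      simp only [List.length_cons, List.replicate_succ, pvPatch]
      rw [ih (k + 1) hdrop]
      simp [List.getD_eq_getElem?_getD, h0]

-- the transpose of (red column :: constant '0000' columns) is the row form
theorem pvZipGo_rows (tv : List String) :
    ∀ (red : List String),
    pvZipGo red.length (red :: tv.map (fun _ => List.replicate red.length "0000")) =
      red.map (fun l => l :: tv.map (fun _ => "0000")) := by
  intro red
  induction red with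
  | nil => simp [pvZipGo]
  | cons a red' ih =>
      simp only [List.length_cons, pvZipGo, List.replicate_succ]
      have hne : ((a :: red') ::
          tv.map (fun _ => "0000" :: List.replicate red'.length "0000")).any (·.isEmpty) = false := by
        simp [List.any_eq_false]
      simp only [List.isEmpty_cons, Bool.false_or, hne, Bool.false_eq_true, if_false,
        List.map_cons, List.map_map, Function.comp_def, List.headD_cons, List.tail_cons]
      rw [ih]

theorem pvAlt_rows (reduced trueValues : List String) :
    create2dArray_alt reduced trueValues =
      ("0000" :: trueValues) ::
        reduced.map (fun l => l :: trueValues.map (fun _ => "0000")) := by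
  unfold create2dArray_alt pvZipStar
  simp only [List.headD_cons, List.length_cons, pvZipGo]
  have hne : (("0000" :: reduced) ::
      trueValues.map (fun v => v :: List.replicate reduced.length "0000")).any (·.isEmpty) = false := by
    simp [List.any_eq_false]
  simp only [List.isEmpty_cons, Bool.false_or, hne, Bool.false_eq_true, if_false,
    List.map_cons, List.map_map, Function.comp_def, List.headD_cons, List.tail_cons]
  rw [pvZipGo_rows]
  simp

-- ===== VERDICT (by name: the statement is the Claim_ definition above) =====
theorem create2dArray_spec : Claim_equal_create2dArray := by
  intro reduced trueValues _
  show create2dArray reduced trueValues = create2dArray_alt reduced trueValues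
  rw [pvAlt_rows]
  unfold create2dArray
  simp only [List.map_const', List.length_range]
  rw [List.replicate_succ, List.foldl_cons]
  simp only [gt_iff_lt, Nat.lt_irrefl, if_false, List.nil_append, Nat.zero_add]
  have := pvFoldl_patch reduced
      (List.replicate reduced.length (List.replicate (trueValues.length + 1) "0000"))
      [List.replicate (trueValues.length + 1) "0000"] 1
  rw [this, pvPatch_replicate reduced (List.replicate (trueValues.length + 1) "0000")
        reduced 0 (by simp)]
  simp [List.replicate_succ]
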